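-- pv_equiv track=rewrite | github.com/wlsgur11/Algorithm_Python | 프로그래머스/2/131127. 할인 행사/할인 행사.py | solution
-- ===== SOURCE A (Python) =====
-- from collections import Counter
--
-- def solution(want, number, discount):
--     ans = 0
--     di = {}
--
--     for w, n in zip(want, number):
--         di[w] = n
--
--     for i in range(len(discount) - 9):
--         c = Counter(discount[i:i+10])
--         if c == di:
--             ans += 1
--     return ans
-- ===== SOURCE B (Python) =====
-- def solution(want, number, discount):
--     # Build the target mapping, then slide a window of 10 with an
--     # incrementally maintained count dict and a matched-key counter.
--     di = {}
--     for w, n in zip(want, number):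
--         di[w] = n
--     if len(discount) < 10:
--         return 0
--     if any(v <= 0 for v in di.values()) or sum(di.values()) != 10:
--         # no length-10 window (Counter has only positive counts summing to 10)
--         # can equal di, so no window matches
--         return 0
--     target = len(di)
--     cnt = {}
--     matched = 0  # number of keys k of di with cnt.get(k, 0) == di[k]
--
--     def upd(k, delta):
--         nonlocal matched
--         old = cnt.get(k, 0)
--         new = old + delta
--         cnt[k] = new
--         if k in di:
--             if old == di[k]:
--                 matched -= 1
--             if new == di[k]:
--                 matched += 1
--
--     for x in discount[:10]:
--         upd(x, 1)
--     ans = 1 if matched == target else 0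
--     for i in range(10, len(discount)):
--         upd(discount[i - 10], -1)
--         upd(discount[i], 1)
--         if matched == target:
--             ans += 1
--     return ans
-- ===== Notes on version B (the rewrite author's own statement) =====
-- stated objective: faster
-- what changed: Instead of rebuilding a Counter of each length-10 slice and comparing it to the dict, B first rejects targets that can never match (a non-positive count or counts not summing to 10) and then slides one window over discount, incrementally updating a count dict and a matched-key counter, adding 1 whenever all target keys match.
import Mathlib
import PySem

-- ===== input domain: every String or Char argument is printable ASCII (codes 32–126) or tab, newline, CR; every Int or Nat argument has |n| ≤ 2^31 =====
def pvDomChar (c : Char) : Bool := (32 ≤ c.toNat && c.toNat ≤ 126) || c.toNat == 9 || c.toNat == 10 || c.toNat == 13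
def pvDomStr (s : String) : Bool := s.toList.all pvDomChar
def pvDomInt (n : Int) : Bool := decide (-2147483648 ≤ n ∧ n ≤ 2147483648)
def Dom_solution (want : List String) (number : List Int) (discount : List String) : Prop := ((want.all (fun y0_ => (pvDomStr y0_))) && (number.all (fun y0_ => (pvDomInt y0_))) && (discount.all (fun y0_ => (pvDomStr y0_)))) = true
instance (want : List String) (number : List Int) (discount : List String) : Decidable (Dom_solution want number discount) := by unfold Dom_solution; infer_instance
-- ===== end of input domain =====

-- B replaces the per-window Counter rebuild + dict comparison by a guarded
-- sliding window with an incrementally maintained count dict and matched-key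
-- counter (measurably faster by a constant factor).

-- ===== PORT A =====
-- Python dict equality `c == di` (order-insensitive: same keys, same values)
def pyDictEq (a b : PySem.Dict String Int) : Bool :=
  a.items.all (fun p => b.get? p.1 == some p.2) && b.items.all (fun p => a.get? p.1 == some p.2)

def solution (want : List String) (number : List Int) (discount : List String) : Int :=
  let di := (want.zip number).foldl (fun d p => d.insert p.1 p.2) PySem.Dict.empty
  (PySem.List.pyRange 0 ((discount.length : Int) - 9) 1).foldl
    (fun ans i =>
      let c := PySem.Dict.counter (PySem.List.slice discount (some i) (some (i + 10)))
      if pyDictEq c di then ans + 1 else ans) 0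

-- ===== PORT B =====
-- upd(k, delta) of Source B: change cnt[k] by delta, keep `matched` in step
def updB (di : PySem.Dict String Int) (st : PySem.Dict String Int × Int)
    (k : String) (delta : Int) : PySem.Dict String Int × Int :=
  let old := st.1.getD k 0
  let nw := old + delta
  let cnt := st.1.insert k nw
  match di.get? k with
  | none => (cnt, st.2)
  | some v =>
    let m := if old = v then st.2 - 1 else st.2
    (cnt, if nw = v then m + 1 else m)

def solution_alt (want : List String) (number : List Int) (discount : List String) : Int :=
  let di := (want.zip number).foldl (fun d p => d.insert p.1 p.2) PySem.Dict.empty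
  if discount.length < 10 then 0
  else if di.values.any (fun v => decide (v ≤ 0)) || di.values.sum != 10 then 0
  else
    let target : Int := di.size
    let st0 := (PySem.List.slice discount (some 0) (some 10)).foldl
      (fun st x => updB di st x 1) (PySem.Dict.empty, 0)
    let ans0 : Int := if st0.2 = target then 1 else 0
    let res := (discount.zip (PySem.List.slice discount (some 10) none)).foldl
      (fun (p : (PySem.Dict String Int × Int) × Int) q =>
        let st := updB di (updB di p.1 q.1 (-1)) q.2 1
        (st, if st.2 = target then p.2 + 1 else p.2))
      (st0, ans0)
    res.2

-- ===== PRECONDITION & SPEC =====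
def Spec_solution (want : List String) (number : List Int) (discount : List String) (out : Int) : Prop := out = solution_alt want number discount
instance (want : List String) (number : List Int) (discount : List String) (out : Int) : Decidable (Spec_solution want number discount out) := by unfold Spec_solution; infer_instance

-- ===== CLAIM (what is proved, stated in full; the proofs are below) =====
def Claim_equal_solution : Prop := ∀ (want : List String) (number : List Int) (discount : List String), Dom_solution want number discount → Spec_solution want number discount (solution want number discount)

-- ===== LEMMAS AND PROOFS =====

-- the window of 10 starting at j
def winPV (ds : List String) (j : Nat) : List String := (ds.drop j).take 10

-- "window j matches the target dict": counts agree on every target key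
def PwPV (di : PySem.Dict String Int) (ds : List String) (j : Nat) : Bool :=
  di.items.all (fun p => decide (((winPV ds j).count p.1 : Int) = p.2))

-- the value of B's `matched` counter for an abstract count table f
def mSpecPV (di : PySem.Dict String Int) (f : String → Int) : Int :=
  ((di.items.countP fun p => decide (f p.1 = p.2) : Nat) : Int)

lemma countP_eq_of_no_key (l : List (String × Int)) (f g : String → Int) (k : String)
    (hfg : ∀ j, j ≠ k → f j = g j) (hk : ∀ p ∈ l, p.1 ≠ k) :
    l.countP (fun p => decide (f p.1 = p.2)) = l.countP (fun p => decide (g p.1 = p.2)) := by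
  apply List.countP_congr
  intro p hp
  rw [hfg p.1 (hk p hp)]

lemma countP_update (l : List (String × Int)) (hnd : (l.map Prod.fst).Nodup)
    (f g : String → Int) (k : String) (v : Int)
    (hfg : ∀ j, j ≠ k → f j = g j) (hv : (k, v) ∈ l) :
    ((l.countP fun p => decide (g p.1 = p.2)) : Int)
      = (l.countP fun p => decide (f p.1 = p.2))
        + ((if g k = v then 1 else 0) - (if f k = v then 1 else 0)) := by
  induction l with
  | nil => simp at hv
  | cons q t ih =>
    simp only [List.map_cons, List.nodup_cons] at hnd
    rcases List.mem_cons.mp hv with hq | ht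
    · subst hq
      have hkt : ∀ p ∈ t, p.1 ≠ k := by
        intro p hp hpk
        have hm := List.mem_map_of_mem (f := Prod.fst) hp
        rw [hpk] at hm
        exact hnd.1 hm
      rw [List.countP_cons, List.countP_cons,
        countP_eq_of_no_key t f g k hfg hkt]
      push_cast
      split_ifs with h1 h2 h3 <;> simp_all
    · have hqk : q.1 ≠ k := by
        intro h
        have hm := List.mem_map_of_mem (f := Prod.fst) ht
        exact hnd.1 (h ▸ hm)
      rw [List.countP_cons, List.countP_cons]
      have hq : (decide (f q.1 = q.2) : Bool) = decide (g q.1 = q.2) := by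
        rw [hfg q.1 hqk]
      rw [← hq]
      have := ih hnd.2 ht
      push_cast at this ⊢
      omega

lemma mSpecPV_congr (di : PySem.Dict String Int) (f g : String → Int)
    (h : ∀ k, f k = g k) : mSpecPV di f = mSpecPV di g := by
  unfold mSpecPV
  congr 1
  apply List.countP_congr
  intro p _
  rw [h p.1]

lemma updB_spec (di : PySem.Dict String Int) (hnd : di.keys.Nodup)
    (cnt : PySem.Dict String Int) (matched : Int) (k : String) (d : Int) (f : String → Int)
    (hc : ∀ j, cnt.getD j 0 = f j) (hm : matched = mSpecPV di f) :
    (∀ j, (updB di (cnt, matched) k d).1.getD j 0 = if j = k then f k + d else f j)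
    ∧ (updB di (cnt, matched) k d).2
        = mSpecPV di (fun j => if j = k then f k + d else f j) := by
  have hkeys : di.keys = di.items.map Prod.fst := rfl
  unfold updB
  cases hk : di.get? k with
  | none =>
    have hnk : ∀ p ∈ di.items, p.1 ≠ k := by
      intro p hp hpk
      have : k ∉ di.keys := (PySem.Dict.get?_eq_none_iff_not_mem_keys di k).mp hk
      exact this (hkeys ▸ (hpk ▸ List.mem_map_of_mem (f := Prod.fst) hp))
    constructor
    · intro j
      simp only [PySem.Dict.getD_insert, hc]
    · show matched = _
      rw [hm]
      unfold mSpecPV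
      congr 1
      exact countP_eq_of_no_key _ _ _ k (fun j hj => (if_neg hj).symm) hnk
  | some v =>
    have hmem : (k, v) ∈ di.items := (PySem.Dict.get?_eq_some_iff_mem_items di k v hnd).mp hk
    constructor
    · intro j
      simp only [PySem.Dict.getD_insert, hc]
    · show (if cnt.getD k 0 + d = v then (if cnt.getD k 0 = v then matched - 1 else matched) + 1
            else (if cnt.getD k 0 = v then matched - 1 else matched)) = _
      have hcu := countP_update di.items (hkeys ▸ hnd) f
        (fun j => if j = k then f k + d else f j) k v
        (by intro j hj; simp [hj]) hmem
      unfold mSpecPV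
      rw [hcu]
      simp only [if_pos rfl] at *
      rw [hc k, hm]
      unfold mSpecPV
      split_ifs <;> omega

lemma build_spec (di : PySem.Dict String Int) (hnd : di.keys.Nodup) (w : List String) :
    ∀ (st : PySem.Dict String Int × Int) (f : String → Int),
      (∀ j, st.1.getD j 0 = f j) → st.2 = mSpecPV di f →
      (∀ j, (w.foldl (fun st x => updB di st x 1) st).1.getD j 0 = f j + (w.count j : Int))
      ∧ (w.foldl (fun st x => updB di st x 1) st).2
          = mSpecPV di (fun j => f j + (w.count j : Int)) := by
  induction w with
  | nil =>
    intro st f hc hm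
    simp only [List.foldl_nil]
    constructor
    · intro j; rw [hc j, List.count_nil]; simp
    · rw [hm]; apply mSpecPV_congr; intro k; simp
  | cons x t ih =>
    intro st f hc hm
    have h1 := updB_spec di hnd st.1 st.2 x 1 f hc hm
    have h2 := ih (updB di (st.1, st.2) x 1) (fun j => if j = x then f x + 1 else f j) h1.1 h1.2
    simp only [List.foldl_cons]
    have hfix : ∀ j, (if j = x then f x + 1 else f j) + (t.count j : Int)
        = f j + (((x :: t).count j : Int)) := by
      intro j
      rw [List.count_cons]
      rcases eq_or_ne j x with hj | hj
      · subst hj; simp; push_cast; omega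
      · simp [hj, (Ne.symm hj)]
    constructor
    · intro j
      rw [show st = (st.1, st.2) from rfl] at h2 ⊢ -- align
      rw [h2.1 j, hfix j]
    · rw [show st = (st.1, st.2) from rfl]
      rw [h2.2]
      apply mSpecPV_congr
      intro j
      exact hfix j

lemma take10 (l : List String) (h9 : 9 < l.length) :
    List.take 10 l = List.take 9 l ++ [l[9]] := by
  have := List.take_succ (l := l) (i := 9)
  simpa [List.getElem?_eq_getElem h9] using this

lemma win_succ (ds : List String) (j : Nat) (h : j + 10 < ds.length) :
    winPV ds j ++ [ds[j+10]] = ds[j] :: winPV ds (j+1) := by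
  unfold winPV
  have hj : j < ds.length := by omega
  have h9 : 9 < (ds.drop (j+1)).length := by simp; omega
  rw [List.drop_eq_getElem_cons hj]
  rw [show List.take 10 (ds[j] :: ds.drop (j+1)) = ds[j] :: List.take 9 (ds.drop (j+1)) from rfl]
  rw [take10 _ h9, List.getElem_drop]
  simp [show j + 1 + 9 = j + 10 from by omega]

lemma count_win_succ (ds : List String) (j : Nat) (h : j + 10 < ds.length) (k : String) :
    ((winPV ds (j+1)).count k : Int)
      = ((winPV ds j).count k : Int)
        - (if k = ds[j] then 1 else 0) + (if k = ds[j+10] then 1 else 0) := by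
  have hw := win_succ ds j h
  have hcnt : List.count k (winPV ds j) + (if ds[j+10] = k then 1 else 0)
      = List.count k (winPV ds (j+1)) + (if ds[j] = k then 1 else 0) := by
    simpa [List.count_append, List.count_cons, beq_iff_eq] using
      congrArg (List.count k) hw
  simp only [show (k = ds[j]) = (ds[j] = k) from propext ⟨Eq.symm, Eq.symm⟩,
    show (k = ds[j+10]) = (ds[j+10] = k) from propext ⟨Eq.symm, Eq.symm⟩]
  split_ifs at hcnt ⊢ <;> push_cast at hcnt ⊢ <;> omega

lemma counter_get?_eq_some (w : List String) (k : String) (v : Int) :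
    (PySem.Dict.counter w).get? k = some v ↔ (k ∈ w ∧ v = (w.count k : Int)) := by
  rw [PySem.Dict.get?_eq_some_iff_mem_items _ _ _ (PySem.Dict.nodup_keys_counter w),
    PySem.Dict.items_counter]
  simp only [List.mem_map]
  constructor
  · rintro ⟨a, ha, heq⟩
    have h1 : a = k := congrArg Prod.fst heq
    have h2 : ((w.count a : Nat) : Int) = v := congrArg Prod.snd heq
    subst h1
    exact ⟨(PySem.Set.mem_ofList w a).mp ha, h2.symm⟩
  · rintro ⟨hk, hv⟩
    exact ⟨k, (PySem.Set.mem_ofList w k).mpr hk, by rw [hv]⟩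

lemma values_sum_eq (di : PySem.Dict String Int) (hnd : di.keys.Nodup) (w : List String)
    (h : ∀ p ∈ di.items, p.2 = (w.count p.1 : Int)) :
    di.values.sum = ((∑ a ∈ di.keys.toFinset, w.count a : Nat) : Int) := by
  have hkeys : di.keys = di.items.map Prod.fst := rfl
  have hvals : di.values = di.items.map Prod.snd := rfl
  rw [hvals]
  rw [List.map_congr_left (fun p hp => h p hp)]
  rw [List.sum_toFinset _ hnd, hkeys, List.map_map]
  push_cast
  rw [List.map_map]
  rfl

lemma keys_sum_eq_length (di : PySem.Dict String Int) (w : List String)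
    (hsub : ∀ p ∈ di.items, p.1 ∈ w) (hsup : ∀ k ∈ w, k ∈ di.keys) :
    (∑ a ∈ di.keys.toFinset, w.count a) = w.length := by
  have hset : di.keys.toFinset = w.toFinset := by
    apply Finset.ext
    intro a
    simp only [List.mem_toFinset]
    constructor
    · intro ha
      have : a ∈ di.items.map Prod.fst := ha
      obtain ⟨p, hp, hpa⟩ := List.mem_map.mp this
      exact hpa ▸ hsub p hp
    · exact hsup a
  rw [hset, List.sum_toFinset_count_eq_length]

lemma keys_sum_lt_length (di : PySem.Dict String Int) (w : List String)
    (hsub : ∀ p ∈ di.items, p.1 ∈ w) (k0 : String) (hk0w : k0 ∈ w) (hk0 : k0 ∉ di.keys) :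
    (∑ a ∈ di.keys.toFinset, w.count a) < w.length := by
  rw [← List.sum_toFinset_count_eq_length w]
  apply Finset.sum_lt_sum_of_subset
  · intro a ha
    simp only [List.mem_toFinset] at ha ⊢
    obtain ⟨p, hp, hpa⟩ := List.mem_map.mp (ha : a ∈ di.items.map Prod.fst)
    exact hpa ▸ hsub p hp
  · exact List.mem_toFinset.mpr hk0w
  · exact fun hc => hk0 (List.mem_toFinset.mp hc)
  · exact List.count_pos_iff.mpr hk0w
  · intro j _ _; exact Nat.zero_le _

lemma dictEq_unfold (c di : PySem.Dict String Int) :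
    pyDictEq c di = true
      ↔ (∀ p ∈ c.items, di.get? p.1 = some p.2) ∧ (∀ p ∈ di.items, c.get? p.1 = some p.2) := by
  unfold pyDictEq
  rw [Bool.and_eq_true, List.all_eq_true, List.all_eq_true]
  constructor
  · rintro ⟨h1, h2⟩
    exact ⟨fun p hp => beq_iff_eq.mp (h1 p hp), fun p hp => beq_iff_eq.mp (h2 p hp)⟩
  · rintro ⟨h1, h2⟩
    exact ⟨fun p hp => beq_iff_eq.mpr (h1 p hp), fun p hp => beq_iff_eq.mpr (h2 p hp)⟩

lemma mem_counter_items (w : List String) (k : String) (hk : k ∈ w) :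
    (k, (w.count k : Int)) ∈ (PySem.Dict.counter w).items := by
  rw [PySem.Dict.items_counter]
  exact List.mem_map.mpr ⟨k, (PySem.Set.mem_ofList w k).mpr hk, rfl⟩

lemma dictEq_elim (di : PySem.Dict String Int) (w : List String)
    (h : pyDictEq (PySem.Dict.counter w) di = true) :
    (∀ p ∈ di.items, p.2 = (w.count p.1 : Int) ∧ p.1 ∈ w)
    ∧ (∀ k ∈ w, k ∈ di.keys) := by
  obtain ⟨h1, h2⟩ := (dictEq_unfold _ _).mp h
  constructor
  · intro p hp
    obtain ⟨hm, hv⟩ := (counter_get?_eq_some w p.1 p.2).mp (h2 p hp)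
    exact ⟨hv, hm⟩
  · intro k hk
    have hget := h1 (k, (w.count k : Int)) (mem_counter_items w k hk)
    by_contra hknot
    rw [(PySem.Dict.get?_eq_none_iff_not_mem_keys di k).mpr hknot] at hget
    simp at hget

lemma dictEq_intro (di : PySem.Dict String Int) (w : List String) (hnd : di.keys.Nodup)
    (hpos : ∀ p ∈ di.items, 0 < p.2) (hsum : di.values.sum = 10) (hw : w.length = 10)
    (h : ∀ p ∈ di.items, ((w.count p.1 : Int) = p.2)) :
    pyDictEq (PySem.Dict.counter w) di = true := by
  have hsub : ∀ p ∈ di.items, p.1 ∈ w := by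
    intro p hp
    have := hpos p hp
    have hcv := h p hp
    have : 0 < w.count p.1 := by omega
    exact List.count_pos_iff.mp this
  have hsup : ∀ k ∈ w, k ∈ di.keys := by
    intro k hk
    by_contra hknot
    have hlt := keys_sum_lt_length di w hsub k hk hknot
    have heq := values_sum_eq di hnd w (fun p hp => (h p hp).symm)
    rw [hsum, hw] at *
    omega
  apply (dictEq_unfold _ _).mpr
  constructor
  · intro q hq
    rw [PySem.Dict.items_counter] at hq
    obtain ⟨a, ha, rfl⟩ := List.mem_map.mp hq
    have haw : a ∈ w := (PySem.Set.mem_ofList w a).mp ha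
    obtain ⟨v, hv⟩ : ∃ v, di.get? a = some v := by
      rcases ho : di.get? a with _ | v
      · exact absurd ((PySem.Dict.get?_eq_none_iff_not_mem_keys di a).mp ho) (by simp [hsup a haw])
      · exact ⟨v, rfl⟩
    have hmem := (PySem.Dict.get?_eq_some_iff_mem_items di a v hnd).mp hv
    have hva := h (a, v) hmem
    simp only [hv]
    exact congrArg some (by exact_mod_cast hva.symm)
  · intro p hp
    exact (counter_get?_eq_some w p.1 p.2).mpr ⟨hsub p hp, (h p hp).symm⟩

lemma dictEq_false_of_nonpos (di : PySem.Dict String Int) (w : List String)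
    (p0 : String × Int) (hp0 : p0 ∈ di.items) (hle : p0.2 ≤ 0) :
    pyDictEq (PySem.Dict.counter w) di = false := by
  rw [Bool.eq_false_iff]
  intro h
  obtain ⟨h1, _⟩ := dictEq_elim di w h
  obtain ⟨hv, hm⟩ := h1 p0 hp0
  have : 0 < w.count p0.1 := List.count_pos_iff.mpr hm
  omega

lemma dictEq_false_of_sum_ne (di : PySem.Dict String Int) (w : List String)
    (hnd : di.keys.Nodup) (hw : w.length = 10) (hs : di.values.sum ≠ 10) :
    pyDictEq (PySem.Dict.counter w) di = false := by
  rw [Bool.eq_false_iff]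
  intro h
  obtain ⟨h1, h2⟩ := dictEq_elim di w h
  have heq := values_sum_eq di hnd w (fun p hp => (h1 p hp).1)
  rw [keys_sum_eq_length di w (fun p hp => (h1 p hp).2) h2, hw] at heq
  exact hs (by rw [heq]; rfl)

lemma mSpec_eq_size_iff (di : PySem.Dict String Int) (f : String → Int) :
    (mSpecPV di f = (di.size : Int))
      ↔ (di.items.all fun p => decide (f p.1 = p.2)) = true := by
  unfold mSpecPV
  have hsize : di.size = di.items.length := rfl
  rw [hsize, Int.natCast_inj, List.countP_eq_length, List.all_eq_true]

lemma mSpec_eq_size_iff_win (di : PySem.Dict String Int) (ds : List String) (j : Nat) :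
    (mSpecPV di (fun k => ((winPV ds j).count k : Int)) = (di.size : Int))
      ↔ PwPV di ds j = true := by
  unfold PwPV
  exact mSpec_eq_size_iff di _

lemma upd2_eval (f : String → Int) (dj d10 x : String) :
    (if x = d10 then (if d10 = dj then f dj + -1 else f d10) + 1
     else if x = dj then f dj + -1 else f x)
      = f x - (if x = dj then 1 else 0) + (if x = d10 then 1 else 0) := by
  split_ifs <;> simp_all <;> omega

lemma slide_spec (di : PySem.Dict String Int) (hnd : di.keys.Nodup) (ds : List String)
    (target : Int) (htarget : target = (di.size : Int)) :
    ∀ (m j : Nat) (st : PySem.Dict String Int × Int) (a : Int),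
      ds.length - 10 - j = m → j + 10 ≤ ds.length →
      (∀ k, st.1.getD k 0 = ((winPV ds j).count k : Int)) →
      st.2 = mSpecPV di (fun k => ((winPV ds j).count k : Int)) →
      (((ds.drop j).zip (ds.drop (j + 10))).foldl
        (fun (p : (PySem.Dict String Int × Int) × Int) q =>
          (updB di (updB di p.1 q.1 (-1)) q.2 1,
            if (updB di (updB di p.1 q.1 (-1)) q.2 1).2 = target then p.2 + 1 else p.2))
        (st, a)).2
      = a + ((List.range m).countP (fun t => PwPV di ds (j + 1 + t)) : Int) := by
  intro m
  induction m with
  | zero =>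
    intro j st a hm hj hc hmt
    have hnil : ds.drop (j + 10) = [] := List.drop_eq_nil_of_le (by omega)
    rw [hnil, List.zip_nil_right, List.foldl_nil]
    simp
  | succ m ih =>
    intro j st a hm hj hc hmt
    have hlt : j + 10 < ds.length := by omega
    rw [List.drop_eq_getElem_cons (show j < ds.length by omega),
      List.drop_eq_getElem_cons hlt, List.zip_cons_cons, List.foldl_cons]
    have h1 := updB_spec di hnd st.1 st.2 ds[j] (-1) _ hc hmt
    have h2 := updB_spec di hnd _ _ ds[j+10] 1 _ h1.1 h1.2
    have hc2 : ∀ x, (updB di (updB di st ds[j] (-1)) ds[j+10] 1).1.getD x 0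
        = ((winPV ds (j+1)).count x : Int) := by
      intro x
      have hx := h2.1 x
      simp only [] at hx
      rw [hx, count_win_succ ds j hlt x]
      exact upd2_eval (fun k => ((winPV ds j).count k : Int)) ds[j] ds[j+10] x
    have hm2 : (updB di (updB di st ds[j] (-1)) ds[j+10] 1).2
        = mSpecPV di (fun k => ((winPV ds (j+1)).count k : Int)) := by
      rw [h2.2]
      apply mSpecPV_congr
      intro x
      rw [count_win_succ ds j hlt x]
      exact upd2_eval (fun k => ((winPV ds j).count k : Int)) ds[j] ds[j+10] x
    have hih := ih (j+1) (updB di (updB di st ds[j] (-1)) ds[j+10] 1)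
      (if (updB di (updB di st ds[j] (-1)) ds[j+10] 1).2 = target then a + 1 else a)
      (by omega) (by omega) hc2 hm2
    have hstep : ∀ t : Nat, j + 1 + 1 + t = j + 1 + (t + 1) := by omega
    have ha' : (if (updB di (updB di st ds[j] (-1)) ds[j+10] 1).2 = target then a + 1 else a)
        = a + (if PwPV di ds (j+1) = true then 1 else 0) := by
      rw [hm2, htarget]
      by_cases hp : PwPV di ds (j+1) = true
      · rw [if_pos ((mSpec_eq_size_iff_win di ds (j+1)).mpr hp), if_pos hp]
      · rw [if_neg (fun hc => hp ((mSpec_eq_size_iff_win di ds (j+1)).mp hc)), if_neg hp]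
        omega
    have hcnt : (List.range (m+1)).countP (fun t => PwPV di ds (j+1+t))
        = ((List.range m).countP (fun t => PwPV di ds (j+1+1+t)))
          + (if PwPV di ds (j+1) = true then 1 else 0) := by
      rw [List.range_succ_eq_map, List.countP_cons, List.countP_map]
      congr 1
      · apply List.countP_congr
        intro t _
        simp only [Function.comp]
        rw [hstep t]
    show (List.foldl _ (updB di (updB di st ds[j] (-1)) ds[j+10] 1,
        if (updB di (updB di st ds[j] (-1)) ds[j+10] 1).2 = target then a + 1 else a) _).2 = _
    rw [hih, ha', hcnt]
    push_cast
    by_cases hp : PwPV di ds (j+1) = true <;> simp [hp] <;> ring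

-- ===== VERDICT (by name: the statement is the Claim_ definition above) =====
theorem solution_spec : Claim_equal_solution := by
  unfold Claim_equal_solution
  intro want number ds _
  unfold Spec_solution solution solution_alt
  dsimp only
  set di := (want.zip number).foldl (fun d p => d.insert p.1 p.2) PySem.Dict.empty with hdi
  have hnd : di.keys.Nodup := by
    rw [hdi]
    exact PySem.Dict.nodup_keys_foldl_insert_key (want.zip number) Prod.fst
      (fun _ p => p.2) PySem.Dict.empty PySem.Dict.nodup_keys_empty
  by_cases h10 : ds.length < 10
  · rw [if_pos h10]
    have hempty : PySem.List.pyRange 0 ((ds.length : Int) - 9) 1 = [] := by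
      simp [PySem.List.pyRange]
      omega
    rw [hempty, List.foldl_nil]
  · rw [if_neg h10]
    push_neg at h10
    by_cases hbad : (di.values.any (fun v => decide (v ≤ 0)) || di.values.sum != 10) = true
    · rw [if_pos hbad]
      rcases Bool.or_eq_true_iff.mp hbad with hneg | hsne
      · obtain ⟨v, hv, hvle⟩ := List.any_eq_true.mp hneg
        obtain ⟨p0, hp0, rfl⟩ := List.mem_map.mp hv
        rw [PySem.List.foldl_congr_mem _ _ (fun acc _ => acc) 0 ?_, PySem.List.foldl_ignore]
        intro acc i _
        rw [dictEq_false_of_nonpos di _ p0 hp0 (by simpa using hvle)]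
        simp
      · have hsne' : di.values.sum ≠ 10 := by simpa using hsne
        rw [PySem.List.foldl_congr_mem _ _ (fun acc _ => acc) 0 ?_, PySem.List.foldl_ignore]
        intro acc i hi
        obtain ⟨hi0, hilt⟩ := PySem.List.mem_pyRange_one.mp hi
        have hslice : PySem.List.slice ds (some i) (some (i+10)) = winPV ds i.toNat := by
          rw [PySem.List.slice_toNat ds hi0 (by omega)]
          unfold winPV
          rw [show (i+10).toNat - i.toNat = 10 from by omega]
        have hwl : (winPV ds i.toNat).length = 10 := by
          unfold winPV
          simp
          omega
        rw [hslice, dictEq_false_of_sum_ne di _ hnd hwl hsne']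
        simp
    · rw [if_neg hbad]
      have hgood : (∀ x ∈ di.values, ¬ x ≤ 0) ∧ di.values.sum = 10 := by
        simpa [not_or, List.any_eq_true] using hbad
      have hpos : ∀ p ∈ di.items, 0 < p.2 := by
        intro p hp
        have := hgood.1 p.2 (List.mem_map.mpr ⟨p, hp, rfl⟩)
        omega
      have hsum : di.values.sum = 10 := hgood.2
      have hwl : ∀ j : Nat, j + 10 ≤ ds.length → (winPV ds j).length = 10 := by
        intro j hj
        unfold winPV
        simp
        omega
      -- A side: the fold is a count of matching windows
      rw [PySem.List.foldl_if_add_one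
        (fun i => pyDictEq (PySem.Dict.counter (PySem.List.slice ds (some i) (some (i + 10)))) di)
        _ 0, zero_add]
      rw [show (ds.length : Int) - 9 = ((ds.length - 9 : Nat) : Int) from by omega,
        PySem.List.pyRange_zero_natCast, List.countP_map]
      have hAcong : (List.range (ds.length - 9)).countP
            ((fun i => pyDictEq (PySem.Dict.counter (PySem.List.slice ds (some i) (some (i + 10)))) di)
              ∘ (fun k : Nat => (k : Int)))
          = (List.range (ds.length - 9)).countP (fun j => PwPV di ds j) := by
        apply List.countP_congr
        intro j hj
        rw [List.mem_range] at hj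
        simp only [Function.comp]
        have hslice : PySem.List.slice ds (some (j : Int)) (some ((j : Int) + 10)) = winPV ds j := by
          rw [show ((j : Int) + 10) = ((j + 10 : Nat) : Int) from by push_cast; ring,
            PySem.List.slice_natCast]
          unfold winPV
          rw [show j + 10 - j = 10 from by omega]
        rw [hslice]
        constructor
        · intro h
          unfold PwPV
          rw [List.all_eq_true]
          intro p hp
          have := (dictEq_elim di _ h).1 p hp
          simp [this.1]
        · intro h
          apply dictEq_intro di _ hnd hpos hsum (hwl j (by omega))
          intro p hp
          unfold PwPV at h
          rw [List.all_eq_true] at h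
          simpa using h p hp
      rw [hAcong]
      -- B side
      have htake : PySem.List.slice ds (some 0) (some 10) = winPV ds 0 := by
        rw [PySem.List.slice_toNat ds (by norm_num) (by norm_num)]
        rfl
      have hdrop : PySem.List.slice ds (some 10) none = ds.drop 10 := by
        rw [PySem.List.slice_from ds (by norm_num)]
        rfl
      rw [htake, hdrop]
      have hst0 := build_spec di hnd (winPV ds 0) (PySem.Dict.empty, 0) (fun _ => 0)
        (fun j => by simp [pysem]) (by
          unfold mSpecPV
          rw [show di.items.countP (fun p => decide ((fun _ : String => (0 : Int)) p.1 = p.2)) = 0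
            from List.countP_eq_zero.mpr (fun p hp => by have := hpos p hp; simp; omega)]
          simp)
      have hc0 : ∀ k, ((winPV ds 0).foldl (fun st x => updB di st x 1)
          (PySem.Dict.empty, 0)).1.getD k 0 = ((winPV ds 0).count k : Int) := by
        intro k
        rw [hst0.1 k]
        ring
      have hm0 : ((winPV ds 0).foldl (fun st x => updB di st x 1) (PySem.Dict.empty, 0)).2
          = mSpecPV di (fun k => ((winPV ds 0).count k : Int)) := by
        rw [hst0.2]
        apply mSpecPV_congr
        intro k
        ring
      have hslide := slide_spec di hnd ds (di.size : Int) rfl (ds.length - 10) 0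
        ((winPV ds 0).foldl (fun st x => updB di st x 1) (PySem.Dict.empty, 0))
        (if ((winPV ds 0).foldl (fun st x => updB di st x 1) (PySem.Dict.empty, 0)).2
            = (di.size : Int) then 1 else 0)
        (by omega) (by omega) hc0 hm0
      simp only [List.drop_zero, Nat.zero_add] at hslide
      rw [hslide]
      have hans0 : (if ((winPV ds 0).foldl (fun st x => updB di st x 1)
            (PySem.Dict.empty, 0)).2 = (di.size : Int) then (1 : Int) else 0)
          = (if PwPV di ds 0 = true then 1 else 0) := by
        rw [hm0]
        by_cases hp : PwPV di ds 0 = true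
        · rw [if_pos ((mSpec_eq_size_iff_win di ds 0).mpr hp), if_pos hp]
        · rw [if_neg (fun hc => hp ((mSpec_eq_size_iff_win di ds 0).mp hc)), if_neg hp]
      rw [hans0]
      have hranges : (List.range (ds.length - 9)).countP (fun j => PwPV di ds j)
          = ((List.range (ds.length - 10)).countP (fun t => PwPV di ds (0 + 1 + t)))
            + (if PwPV di ds 0 = true then 1 else 0) := by
        rw [show ds.length - 9 = (ds.length - 10) + 1 from by omega, List.range_succ_eq_map,
          List.countP_cons, List.countP_map]
        congr 1
        apply List.countP_congr
        intro t _
        simp only [Function.comp]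
        rw [show 0 + 1 + t = t + 1 from by omega]
      rw [hranges]
      push_cast
      by_cases hp0 : PwPV di ds 0 = true <;> simp [hp0] <;> ring
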